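-- pv_equiv track=rewrite | github.com/corbata-research/Corbata-code | rsa_benchmark_corbata_fair.py | generate_corbata_row
-- ===== SOURCE A (Python) =====
-- def generate_corbata_row(r):
--     """Return the r-th Corbata row as a list of integers."""
--     if r == 1:
--         return [1]
--
--     L = (r - 2) ** 2 + 2
--
--     if r == 2:
--         return [L]
--
--     row_len = r - 1
--     row = [0] * row_len
--     row[0] = L
--
--     if r % 2 == 0:
--         k = r // 2
--         negcount = k - 1
--         idx = 0
--
--         for p in range(negcount - 1, -1, -1):
--             idx += 1
--             diff_val = -2 * (k + p - 1)
--             row[idx] = row[idx - 1] + diff_val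
--
--         for t in range(1, negcount + 1):
--             idx += 1
--             diff_val = 2 * (k + t)
--             row[idx] = row[idx - 1] + diff_val
--
--     else:
--         k = (r - 1) // 2
--         idx = 0
--
--         for s in range(k - 2, -1, -1):
--             idx += 1
--             diff_val = -2 * (k + s)
--             row[idx] = row[idx - 1] + diff_val
--
--         idx += 1
--         row[idx] = row[idx - 1] + 2
--
--         for t in range(2, k + 1):
--             idx += 1
--             diff_val = 2 * (k + t)
--             row[idx] = row[idx - 1] + diff_val
--
--     if len(row) != r - 1:
--         raise ValueError("Row length mismatch at r = " + str(r))
--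
--     return row
-- ===== SOURCE B (Python) =====
-- def generate_corbata_row(r):
--     """Return the r-th Corbata row via per-position closed forms (no running sums)."""
--     if r == 1:
--         return [1]
--     L = (r - 2) ** 2 + 2
--     if r == 2:
--         return [L]
--     if r % 2 == 0:
--         k = r // 2
--         m = k - 1
--         def val(i):
--             if i <= m:
--                 # prefix sum of diffs -2*(2k-2-j) for j=1..i
--                 return L + i * (i + 1) - 2 * i * (2 * k - 2)
--             return (L + m * (m + 1) - 2 * m * (2 * k - 2)
--                     + i * (i + 3) - m * (m + 3))
--     else:
--         k = (r - 1) // 2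
--         m = k - 1
--         def val(i):
--             if i <= m:
--                 return L + i * (i + 1) - 2 * i * (2 * k - 1)
--             base = L + m * (m + 1) - 2 * m * (2 * k - 1) + 2
--             if i == k:
--                 return base
--             return base + i * (i + 3) - k * (k + 3)
--     return [val(i) for i in range(r - 1)]
-- ===== Notes on version B (the rewrite author's own statement) =====
-- stated objective: alternative
-- what changed: Replaces the in-place running-sum loops over a mutable row by a per-position closed-form quadratic (the prefix sum of A's arithmetic difference sequence evaluated directly), building the row with a single comprehension.
-- outside the precondition, e.g. on generate_corbata_row(0): A raises IndexError, B returns []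
import Mathlib
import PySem

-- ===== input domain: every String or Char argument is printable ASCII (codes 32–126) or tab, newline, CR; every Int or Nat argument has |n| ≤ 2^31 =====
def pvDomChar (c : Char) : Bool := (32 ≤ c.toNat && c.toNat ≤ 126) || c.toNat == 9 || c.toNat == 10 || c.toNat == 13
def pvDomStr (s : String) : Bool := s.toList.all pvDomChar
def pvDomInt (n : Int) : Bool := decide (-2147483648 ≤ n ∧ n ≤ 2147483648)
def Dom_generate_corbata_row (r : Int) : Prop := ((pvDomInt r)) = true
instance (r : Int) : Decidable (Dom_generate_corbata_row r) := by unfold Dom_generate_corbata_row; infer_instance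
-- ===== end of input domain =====

-- B computes each row entry by a closed-form quadratic in its position instead of A's running-sum loops; same values, same cost (objective: alternative).
-- B computes each row entry by a closed-form quadratic in its position instead of A's running-sum loops (objective: alternative, same O(r) cost).


-- ===== PORT A =====
-- Literal port of A: a mutable row, row[0] = L, then running-sum loops writing
-- row[idx] = row[idx-1] + diff_val.  The final length check of A never fails for r ≥ 3,
-- so it is not represented (inside Pre_ it is dead code).
def generate_corbata_row (r : Int) : List Int :=
  if r = 1 then [1]
  else
    let L := (r - 2) ^ 2 + 2
    if r = 2 then [L]
    else
      let row_len := r - 1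
      let row0 := (List.replicate row_len.toNat (0 : Int)).set 0 L
      if PySem.Int.mod r 2 = 0 then
        let k := PySem.Int.floordiv r 2
        let negcount := k - 1
        let st1 := (PySem.List.pyRange (negcount - 1) (-1) (-1)).foldl
          (fun (st : Nat × List Int) p =>
            let idx := st.1 + 1
            let diff_val := -2 * (k + p - 1)
            (idx, st.2.set idx (st.2.getD (idx - 1) 0 + diff_val))) (0, row0)
        let st2 := (PySem.List.pyRange 1 (negcount + 1) 1).foldl
          (fun (st : Nat × List Int) t =>
            let idx := st.1 + 1
            let diff_val := 2 * (k + t)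
            (idx, st.2.set idx (st.2.getD (idx - 1) 0 + diff_val))) st1
        st2.2
      else
        let k := PySem.Int.floordiv (r - 1) 2
        let st1 := (PySem.List.pyRange (k - 2) (-1) (-1)).foldl
          (fun (st : Nat × List Int) s =>
            let idx := st.1 + 1
            let diff_val := -2 * (k + s)
            (idx, st.2.set idx (st.2.getD (idx - 1) 0 + diff_val))) (0, row0)
        let idx := st1.1 + 1
        let st2 : Nat × List Int := (idx, st1.2.set idx (st1.2.getD (idx - 1) 0 + 2))
        let st3 := (PySem.List.pyRange 2 (k + 1) 1).foldl
          (fun (st : Nat × List Int) t =>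
            let idx := st.1 + 1
            let diff_val := 2 * (k + t)
            (idx, st.2.set idx (st.2.getD (idx - 1) 0 + diff_val))) st2
        st3.2

-- ===== PORT B =====
-- Literal port of B: per-position closed-form value, one map over range(r-1).
def generate_corbata_row_alt (r : Int) : List Int :=
  if r = 1 then [1]
  else
    let L := (r - 2) ^ 2 + 2
    if r = 2 then [L]
    else if PySem.Int.mod r 2 = 0 then
      let k := PySem.Int.floordiv r 2
      let m := k - 1
      let val : Int → Int := fun i =>
        if i ≤ m then L + i * (i + 1) - 2 * i * (2 * k - 2)
        else L + m * (m + 1) - 2 * m * (2 * k - 2) + i * (i + 3) - m * (m + 3)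
      (PySem.List.pyRange 0 (r - 1) 1).map val
    else
      let k := PySem.Int.floordiv (r - 1) 2
      let m := k - 1
      let val : Int → Int := fun i =>
        if i ≤ m then L + i * (i + 1) - 2 * i * (2 * k - 1)
        else
          let base := L + m * (m + 1) - 2 * m * (2 * k - 1) + 2
          if i = k then base
          else base + i * (i + 3) - k * (k + 3)
      (PySem.List.pyRange 0 (r - 1) 1).map val

-- ===== PRECONDITION & SPEC =====
-- Pre_: A raises IndexError for r ≤ 0 (row[0] on an empty list); it returns on every r ≥ 1.
def Pre_generate_corbata_row (r : Int) : Prop := 1 ≤ r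
instance (r : Int) : Decidable (Pre_generate_corbata_row r) := by unfold Pre_generate_corbata_row; infer_instance
def pvWitness_generate_corbata_row : Int := 7

def Spec_generate_corbata_row (r : Int) (out : List Int) : Prop := out = generate_corbata_row_alt r
instance (r : Int) (out : List Int) : Decidable (Spec_generate_corbata_row r out) := by unfold Spec_generate_corbata_row; infer_instance

-- ===== CLAIM (what is proved, stated in full; the proofs are below) =====
def Claim_equal_generate_corbata_row : Prop := ∀ (r : Int), Dom_generate_corbata_row r → Pre_generate_corbata_row r → Spec_generate_corbata_row r (generate_corbata_row r)

-- ===== LEMMAS AND PROOFS =====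

def pvScan (f : Int → Int) (v : Int) : List Int → List Int
  | [] => []
  | x :: xs => (v + f x) :: pvScan f (v + f x) xs

lemma pvScanFold (f : Int → Int) : ∀ (xs V : List Int) (v : Int) (z : Nat),
    V.getLast? = some v → xs.length ≤ z →
    xs.foldl (fun (st : Nat × List Int) x =>
        (st.1 + 1, st.2.set (st.1 + 1) (st.2.getD st.1 0 + f x)))
      (V.length - 1, V ++ List.replicate z 0)
    = (V.length - 1 + xs.length, (V ++ pvScan f v xs) ++ List.replicate (z - xs.length) 0) := by
  intro xs
  induction xs with
  | nil => intro V v z _ _; simp [pvScan]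
  | cons x xs ih =>
    intro V v z hlast hz
    have hV : V ≠ [] := by intro h; rw [h] at hlast; simp at hlast
    have hVlen : 1 ≤ V.length := List.length_pos_of_ne_nil hV
    obtain ⟨z', rfl⟩ : ∃ z', z = z' + 1 := ⟨z - 1, by simp at hz; omega⟩
    rw [List.foldl_cons]
    have hidx : V.length - 1 + 1 = V.length := by omega
    have hget : (V ++ List.replicate (z' + 1) (0:Int)).getD (V.length - 1) 0 = v := by
      rw [List.getD_append _ _ _ _ (by omega)]
      rw [List.getD_eq_getElem?_getD, ← List.getLast?_eq_getElem?, hlast]; rfl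
    have hset : (V ++ List.replicate (z' + 1) (0:Int)).set V.length (v + f x)
        = (V ++ [v + f x]) ++ List.replicate z' 0 := by
      rw [List.set_append_right _ _ (by omega)]
      simp [List.replicate_succ]
    have IH := ih (V ++ [v + f x]) (v + f x) z' (by simp) (by simp at hz ⊢; omega)
    simp only [List.length_append, List.length_cons, List.length_nil, Nat.add_sub_cancel] at IH
    dsimp only
    rw [hidx, hget, hset, IH]
    refine Prod.ext ?_ ?_
    · simp; omega
    · simp [pvScan]

lemma pvScan_pyRange_desc (f g : Int → Int) : ∀ (n : Nat) (a b v : Int), (a - b).toNat = n →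
    v = g (a + 1) → (∀ j, b < j → j ≤ a → g j = g (j + 1) + f j) →
    pvScan f v (PySem.List.pyRange a b (-1)) = (PySem.List.pyRange a b (-1)).map g := by
  intro n
  induction n with
  | zero =>
    intro a b v hn _ _
    rw [PySem.List.pyRange_neg_one_eq_nil (by omega)]; rfl
  | succ n ih =>
    intro a b v hn hv hg
    have hba : b < a := by omega
    rw [PySem.List.pyRange_neg_one_cons hba]
    have h1 : v + f a = g a := by rw [hv, hg a hba le_rfl]
    simp only [pvScan, List.map_cons, h1]
    have ha : a - 1 + 1 = a := by ring
    exact congrArg (g a :: ·) (ih (a - 1) b (g a) (by omega) (by rw [ha]) (fun j h1 h2 => hg j h1 (by omega)))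

lemma pvScan_pyRange_asc (f g : Int → Int) : ∀ (n : Nat) (a b v : Int), (b - a).toNat = n →
    v = g (a - 1) → (∀ j, a ≤ j → j < b → g j = g (j - 1) + f j) →
    pvScan f v (PySem.List.pyRange a b 1) = (PySem.List.pyRange a b 1).map g := by
  intro n
  induction n with
  | zero =>
    intro a b v hn _ _
    rw [PySem.List.pyRange_one_eq_nil (by omega)]; rfl
  | succ n ih =>
    intro a b v hn hv hg
    have hab : a < b := by omega
    rw [PySem.List.pyRange_one_cons hab]
    have h1 : v + f a = g a := by rw [hv, hg a le_rfl hab]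
    simp only [pvScan, List.map_cons, h1]
    have ha : a + 1 - 1 = a := by ring
    exact congrArg (g a :: ·) (ih (a + 1) b (g a) (by omega) (by rw [ha]) (fun j h1 h2 => hg j (by omega) h2))




def pvValE (k L i : Int) : Int :=
  if i ≤ k - 1 then L + i * (i + 1) - 2 * i * (2 * k - 2)
  else L + (k - 1) * (k - 1 + 1) - 2 * (k - 1) * (2 * k - 2) + i * (i + 3) - (k - 1) * (k - 1 + 3)

lemma lastLemma (g : Int → Int) (x a : Int) (h : 0 ≤ a) :
    ([x] ++ (PySem.List.pyRange a (-1) (-1)).map g).getLast? = some (g 0) := by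
  have hne : (PySem.List.pyRange a (-1) (-1)).map g ≠ [] := by
    rw [PySem.List.pyRange_neg_one_cons (by omega : (-1:Int) < a)]; simp
  rw [List.getLast?_append_of_ne_nil _ hne, PySem.List.pyRange_neg_one_eq_reverse,
      List.map_reverse, List.getLast?_reverse, List.head?_map,
      PySem.List.pyRange_one_cons (by omega : (-1:Int)+1 < a+1)]
  norm_num

lemma evenKey (k L : Int) (hk2 : 2 ≤ k) :
    (List.foldl (fun (st : Nat × List Int) t => (st.1 + 1, st.2.set (st.1 + 1) (st.2.getD st.1 0 + 2 * (k + t))))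
        (List.foldl (fun (st : Nat × List Int) p => (st.1 + 1, st.2.set (st.1 + 1) (st.2.getD st.1 0 + -2 * (k + p - 1))))
          (0, (List.replicate (2 * k - 1).toNat (0:Int)).set 0 L)
          (PySem.List.pyRange (k - 1 - 1) (-1) (-1)))
        (PySem.List.pyRange 1 (k - 1 + 1) 1)).2 =
    List.map (pvValE k L) (PySem.List.pyRange 0 (2 * k - 1) 1) := by
  have hrow : (List.replicate (2 * k - 1).toNat (0:Int)).set 0 L
      = [L] ++ List.replicate (2 * k - 2).toNat 0 := by
    have h : (2 * k - 1).toNat = (2 * k - 2).toNat + 1 := by omega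
    rw [h, List.replicate_succ]; rfl
  rw [hrow]
  have hlen1 : (PySem.List.pyRange (k - 1 - 1) (-1) (-1)).length ≤ (2 * k - 2).toNat := by
    rw [PySem.List.length_pyRange_neg_one]; omega
  have H1 := pvScanFold (fun p => -2 * (k + p - 1)) (PySem.List.pyRange (k - 1 - 1) (-1) (-1))
      [L] L ((2 * k - 2).toNat) (by simp) hlen1
  simp only [List.length_cons, List.length_nil, Nat.zero_add, Nat.sub_self] at H1
  rw [H1]
  rw [pvScan_pyRange_desc (fun p => -2 * (k + p - 1)) (fun p => pvValE k L (k - 1 - p))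
      (k - 1).toNat (k - 1 - 1) (-1) L (by omega)
      (by show L = pvValE k L (k - 1 - (k - 1 - 1 + 1))
          unfold pvValE; rw [if_pos (by omega)]; ring)
      (by intro j h1 h2
          show pvValE k L (k - 1 - j) = pvValE k L (k - 1 - (j + 1)) + -2 * (k + j - 1)
          unfold pvValE; rw [if_pos (by omega), if_pos (by omega)]; ring)]
  have hlast2 := lastLemma (fun p => pvValE k L (k - 1 - p)) L (k - 1 - 1) (by omega)
  simp only [] at hlast2
  have hlen2 : (PySem.List.pyRange 1 (k - 1 + 1) 1).length
      ≤ (2 * k - 2).toNat - (PySem.List.pyRange (k - 1 - 1) (-1) (-1)).length := by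
    rw [PySem.List.length_pyRange_one, PySem.List.length_pyRange_neg_one]; omega
  have H3 := pvScanFold (fun t => 2 * (k + t)) (PySem.List.pyRange 1 (k - 1 + 1) 1)
      ([L] ++ (PySem.List.pyRange (k - 1 - 1) (-1) (-1)).map (fun p => pvValE k L (k - 1 - p)))
      (pvValE k L (k - 1 - 0))
      ((2 * k - 2).toNat - (PySem.List.pyRange (k - 1 - 1) (-1) (-1)).length)
      hlast2 hlen2
  simp only [List.length_append, List.length_map, List.length_cons, List.length_nil,
    Nat.zero_add, Nat.add_sub_cancel_left] at H3 ⊢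
  rw [H3]
  dsimp only
  have hc : (2 * k - 2).toNat - (PySem.List.pyRange (k - 1 - 1) (-1) (-1)).length
      - (PySem.List.pyRange 1 (k - 1 + 1) 1).length = 0 := by
    rw [PySem.List.length_pyRange_neg_one, PySem.List.length_pyRange_one]; omega
  rw [hc, List.replicate_zero, List.append_nil]
  rw [pvScan_pyRange_asc (fun t => 2 * (k + t)) (fun t => pvValE k L (k - 1 + t))
      (k - 1).toNat 1 (k - 1 + 1) (pvValE k L (k - 1 - 0)) (by omega)
      (by show pvValE k L (k - 1 - 0) = pvValE k L (k - 1 + (1 - 1)); congr 1)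
      (by intro j hj1 hj2
          show pvValE k L (k - 1 + j) = pvValE k L (k - 1 + (j - 1)) + 2 * (k + j)
          unfold pvValE
          by_cases hj : j = 1
          · subst hj; rw [if_neg (by omega), if_pos (by omega)]; ring
          · rw [if_neg (by omega), if_neg (by omega)]; ring)]
  rw [PySem.List.pyRange_one_append 0 1 (2 * k - 1) (by omega) (by omega),
      PySem.List.pyRange_one_append 1 k (2 * k - 1) (by omega) (by omega),
      List.map_append, List.map_append]
  have e0 : List.map (pvValE k L) (PySem.List.pyRange 0 1 1) = [L] := by
    rw [PySem.List.pyRange_one_cons (by omega : (0:Int) < 1),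
        PySem.List.pyRange_one_eq_nil (by omega : (1:Int) ≤ 0 + 1)]
    simp only [List.map_cons, List.map_nil]
    unfold pvValE; rw [if_pos (by omega)]; norm_num
  have e1 : List.map (fun p => pvValE k L (k - 1 - p)) (PySem.List.pyRange (k - 1 - 1) (-1) (-1))
      = List.map (pvValE k L) (PySem.List.pyRange 1 k 1) := by
    rw [PySem.List.pyRange_neg_one, PySem.List.pyRange_one, List.map_map, List.map_map]
    have harg : (k - 1 - 1 - -1).toNat = (k - 1).toNat := by omega
    rw [harg]
    apply List.map_congr_left
    intro j hj
    show pvValE k L (k - 1 - (k - 1 - 1 - (j:Int))) = pvValE k L (1 + (j:Int))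
    congr 1; omega
  have e2 : List.map (fun t => pvValE k L (k - 1 + t)) (PySem.List.pyRange 1 (k - 1 + 1) 1)
      = List.map (pvValE k L) (PySem.List.pyRange k (2 * k - 1) 1) := by
    rw [PySem.List.pyRange_one, PySem.List.pyRange_one, List.map_map, List.map_map]
    have harg : (k - 1 + 1 - 1).toNat = (2 * k - 1 - k).toNat := by omega
    rw [harg]
    apply List.map_congr_left
    intro j hj
    show pvValE k L (k - 1 + (1 + (j:Int))) = pvValE k L (k + (j:Int))
    congr 1; ring
  rw [e0, ← e1, ← e2]
  simp


def pvValO (k L i : Int) : Int :=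
  if i ≤ k - 1 then L + i * (i + 1) - 2 * i * (2 * k - 1)
  else if i = k then L + (k - 1) * (k - 1 + 1) - 2 * (k - 1) * (2 * k - 1) + 2
  else L + (k - 1) * (k - 1 + 1) - 2 * (k - 1) * (2 * k - 1) + 2 + i * (i + 3) - k * (k + 3)

lemma oddKey (k L : Int) (hk2 : 2 ≤ k) :
    (List.foldl (fun (st : Nat × List Int) t => (st.1 + 1, st.2.set (st.1 + 1) (st.2.getD st.1 0 + 2 * (k + t))))
        ((List.foldl (fun (st : Nat × List Int) s => (st.1 + 1, st.2.set (st.1 + 1) (st.2.getD st.1 0 + -2 * (k + s))))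
                (0, (List.replicate (2 * k + 1 - 1).toNat (0:Int)).set 0 L)
                (PySem.List.pyRange (k - 2) (-1) (-1))).1 + 1,
          (List.foldl (fun (st : Nat × List Int) s => (st.1 + 1, st.2.set (st.1 + 1) (st.2.getD st.1 0 + -2 * (k + s))))
                  (0, (List.replicate (2 * k + 1 - 1).toNat (0:Int)).set 0 L)
                  (PySem.List.pyRange (k - 2) (-1) (-1))).2.set
            ((List.foldl (fun (st : Nat × List Int) s => (st.1 + 1, st.2.set (st.1 + 1) (st.2.getD st.1 0 + -2 * (k + s))))
                  (0, (List.replicate (2 * k + 1 - 1).toNat (0:Int)).set 0 L)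
                  (PySem.List.pyRange (k - 2) (-1) (-1))).1 + 1)
            ((List.foldl (fun (st : Nat × List Int) s => (st.1 + 1, st.2.set (st.1 + 1) (st.2.getD st.1 0 + -2 * (k + s))))
                      (0, (List.replicate (2 * k + 1 - 1).toNat (0:Int)).set 0 L)
                      (PySem.List.pyRange (k - 2) (-1) (-1))).2.getD
                (List.foldl (fun (st : Nat × List Int) s => (st.1 + 1, st.2.set (st.1 + 1) (st.2.getD st.1 0 + -2 * (k + s))))
                    (0, (List.replicate (2 * k + 1 - 1).toNat (0:Int)).set 0 L)
                    (PySem.List.pyRange (k - 2) (-1) (-1))).1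
                0 + 2))
        (PySem.List.pyRange 2 (k + 1) 1)).2 =
    List.map (pvValO k L) (PySem.List.pyRange 0 (2 * k + 1 - 1) 1) := by
  have hrow : (List.replicate (2 * k + 1 - 1).toNat (0:Int)).set 0 L
      = [L] ++ List.replicate (2 * k - 1).toNat 0 := by
    have h : (2 * k + 1 - 1).toNat = (2 * k - 1).toNat + 1 := by omega
    rw [h, List.replicate_succ]; rfl
  rw [hrow]
  have hlen1 : (PySem.List.pyRange (k - 2) (-1) (-1)).length ≤ (2 * k - 1).toNat := by
    rw [PySem.List.length_pyRange_neg_one]; omega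
  have H1 := pvScanFold (fun s => -2 * (k + s)) (PySem.List.pyRange (k - 2) (-1) (-1))
      [L] L ((2 * k - 1).toNat) (by simp) hlen1
  simp only [List.length_cons, List.length_nil, Nat.zero_add, Nat.sub_self] at H1
  rw [H1]
  rw [pvScan_pyRange_desc (fun s => -2 * (k + s)) (fun s => pvValO k L (k - 1 - s))
      (k - 1).toNat (k - 2) (-1) L (by omega)
      (by show L = pvValO k L (k - 1 - (k - 2 + 1))
          have h0 : k - 1 - (k - 2 + 1) = 0 := by ring
          rw [h0]; unfold pvValO; rw [if_pos (by omega)]; ring)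
      (by intro j h1 h2
          show pvValO k L (k - 1 - j) = pvValO k L (k - 1 - (j + 1)) + -2 * (k + j)
          unfold pvValO; rw [if_pos (by omega), if_pos (by omega)]; ring)]
  have hlast2 := lastLemma (fun s => pvValO k L (k - 1 - s)) L (k - 2) (by omega)
  simp only [] at hlast2
  have Hmid := pvScanFold (fun _ => (2:Int)) [0]
      ([L] ++ (PySem.List.pyRange (k - 2) (-1) (-1)).map (fun s => pvValO k L (k - 1 - s)))
      (pvValO k L (k - 1 - 0))
      ((2 * k - 1).toNat - (PySem.List.pyRange (k - 2) (-1) (-1)).length)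
      hlast2
      (by rw [PySem.List.length_pyRange_neg_one]; simp; omega)
  simp only [List.foldl_cons, List.foldl_nil, List.length_append, List.length_map,
    List.length_cons, List.length_nil, Nat.zero_add, Nat.add_sub_cancel_left, pvScan] at Hmid
  rw [Hmid]
  have hlast3 : (([L] ++ (PySem.List.pyRange (k - 2) (-1) (-1)).map (fun s => pvValO k L (k - 1 - s)))
      ++ [pvValO k L (k - 1 - 0) + 2]).getLast? = some (pvValO k L (k - 1 - 0) + 2) := by
    rw [List.getLast?_append_of_ne_nil _ (by simp : ([pvValO k L (k - 1 - 0) + 2] : List Int) ≠ [])]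
    rfl
  have hlen3 : (PySem.List.pyRange 2 (k + 1) 1).length
      ≤ (2 * k - 1).toNat - (PySem.List.pyRange (k - 2) (-1) (-1)).length - 1 := by
    rw [PySem.List.length_pyRange_one, PySem.List.length_pyRange_neg_one]; omega
  have H3 := pvScanFold (fun t => 2 * (k + t)) (PySem.List.pyRange 2 (k + 1) 1)
      (([L] ++ (PySem.List.pyRange (k - 2) (-1) (-1)).map (fun s => pvValO k L (k - 1 - s)))
        ++ [pvValO k L (k - 1 - 0) + 2])
      (pvValO k L (k - 1 - 0) + 2)
      ((2 * k - 1).toNat - (PySem.List.pyRange (k - 2) (-1) (-1)).length - 1)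
      hlast3 hlen3
  simp only [List.length_append, List.length_map, List.length_cons, List.length_nil,
    Nat.zero_add, Nat.add_sub_cancel] at H3
  rw [Nat.add_comm 1 ((PySem.List.pyRange (k - 2) (-1) (-1)).length)] at H3
  rw [H3]
  dsimp only
  have hc : (2 * k - 1).toNat - (PySem.List.pyRange (k - 2) (-1) (-1)).length - 1
      - (PySem.List.pyRange 2 (k + 1) 1).length = 0 := by
    rw [PySem.List.length_pyRange_neg_one, PySem.List.length_pyRange_one]; omega
  rw [hc, List.replicate_zero, List.append_nil]
  rw [pvScan_pyRange_asc (fun t => 2 * (k + t)) (fun t => pvValO k L (k + t - 1))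
      (k - 1).toNat 2 (k + 1) (pvValO k L (k - 1 - 0) + 2) (by omega)
      (by show pvValO k L (k - 1 - 0) + 2 = pvValO k L (k + (2 - 1) - 1)
          unfold pvValO
          rw [if_pos (by omega), if_neg (by omega), if_pos (by omega)]; ring)
      (by intro j hj1 hj2
          show pvValO k L (k + j - 1) = pvValO k L (k + (j - 1) - 1) + 2 * (k + j)
          unfold pvValO
          by_cases hj : j = 2
          · subst hj
            rw [if_neg (by omega), if_neg (by omega), if_neg (by omega), if_pos (by omega)]; ring
          · rw [if_neg (by omega), if_neg (by omega), if_neg (by omega), if_neg (by omega)]; ring)]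
  rw [PySem.List.pyRange_one_append 0 1 (2 * k + 1 - 1) (by omega) (by omega),
      PySem.List.pyRange_one_append 1 k (2 * k + 1 - 1) (by omega) (by omega),
      PySem.List.pyRange_one_append k (k + 1) (2 * k + 1 - 1) (by omega) (by omega),
      List.map_append, List.map_append, List.map_append]
  have e0 : List.map (pvValO k L) (PySem.List.pyRange 0 1 1) = [L] := by
    rw [PySem.List.pyRange_one_cons (by omega : (0:Int) < 1),
        PySem.List.pyRange_one_eq_nil (by omega : (1:Int) ≤ 0 + 1)]
    simp only [List.map_cons, List.map_nil]
    unfold pvValO; rw [if_pos (by omega)]; norm_num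
  have e1 : List.map (fun s => pvValO k L (k - 1 - s)) (PySem.List.pyRange (k - 2) (-1) (-1))
      = List.map (pvValO k L) (PySem.List.pyRange 1 k 1) := by
    rw [PySem.List.pyRange_neg_one, PySem.List.pyRange_one, List.map_map, List.map_map]
    have harg : (k - 2 - -1).toNat = (k - 1).toNat := by omega
    rw [harg]
    apply List.map_congr_left
    intro j hj
    show pvValO k L (k - 1 - (k - 2 - (j:Int))) = pvValO k L (1 + (j:Int))
    congr 1; omega
  have emid : List.map (pvValO k L) (PySem.List.pyRange k (k + 1) 1)
      = [pvValO k L (k - 1 - 0) + 2] := by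
    rw [PySem.List.pyRange_one_cons (by omega : k < k + 1),
        PySem.List.pyRange_one_eq_nil (by omega : k + 1 ≤ k + 1)]
    simp only [List.map_cons, List.map_nil]
    have h : pvValO k L k = pvValO k L (k - 1 - 0) + 2 := by
      unfold pvValO
      rw [if_neg (by omega), if_pos rfl, if_pos (by omega)]; ring
    rw [h]
  have e2 : List.map (fun t => pvValO k L (k + t - 1)) (PySem.List.pyRange 2 (k + 1) 1)
      = List.map (pvValO k L) (PySem.List.pyRange (k + 1) (2 * k + 1 - 1) 1) := by
    rw [PySem.List.pyRange_one, PySem.List.pyRange_one, List.map_map, List.map_map]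
    have harg : (k + 1 - 2).toNat = (2 * k + 1 - 1 - (k + 1)).toNat := by omega
    rw [harg]
    apply List.map_congr_left
    intro j hj
    show pvValO k L (k + (2 + (j:Int)) - 1) = pvValO k L (k + 1 + (j:Int))
    congr 1; ring
  rw [e0, ← e1, emid, ← e2]
  simp

theorem mainOdd (k : Int) (hk2 : 2 ≤ k) :
    generate_corbata_row (2 * k + 1) = generate_corbata_row_alt (2 * k + 1) := by
  have hmod : ¬ PySem.Int.mod (2 * k + 1) 2 = 0 := by
    rw [PySem.Int.mod_eq_zero_iff_dvd]; rintro ⟨c, hc⟩; omega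
  have h2 : PySem.Int.mod (2 * k + 1 - 1) 2 = 0 := by
    rw [PySem.Int.mod_eq_zero_iff_dvd]; exact ⟨k, by ring⟩
  have hfd : PySem.Int.floordiv (2 * k + 1 - 1) 2 = k := by
    have h := PySem.Int.floordiv_mul_add_mod (2 * k + 1 - 1) 2
    rw [h2] at h; omega
  unfold generate_corbata_row generate_corbata_row_alt
  rw [if_neg (by omega : ¬ (2*k+1) = 1), if_neg (by omega : ¬ (2*k+1) = 2),
      if_neg (by omega : ¬ (2*k+1) = 1), if_neg (by omega : ¬ (2*k+1) = 2)]
  simp only [hfd, if_neg hmod, Nat.add_sub_cancel]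
  exact oddKey k ((2 * k + 1 - 2) ^ 2 + 2) hk2

theorem mainEven (k : Int) (hk2 : 2 ≤ k) :
    generate_corbata_row (2 * k) = generate_corbata_row_alt (2 * k) := by
  have hmod : PySem.Int.mod (2 * k) 2 = 0 := by
    rw [PySem.Int.mod_eq_zero_iff_dvd]; exact ⟨k, rfl⟩
  have hfd : PySem.Int.floordiv (2 * k) 2 = k := by
    have h := PySem.Int.floordiv_mul_add_mod (2 * k) 2
    rw [hmod] at h; omega
  unfold generate_corbata_row generate_corbata_row_alt
  rw [if_neg (by omega : ¬ (2*k) = 1), if_neg (by omega : ¬ (2*k) = 2),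
      if_neg (by omega : ¬ (2*k) = 1), if_neg (by omega : ¬ (2*k) = 2)]
  simp only [hfd, if_pos hmod, Nat.add_sub_cancel]
  exact evenKey k ((2 * k - 2) ^ 2 + 2) hk2

theorem finalSpec : ∀ (r : Int), 1 ≤ r → generate_corbata_row r = generate_corbata_row_alt r := by
  intro r hpre
  by_cases e1 : r = 1
  · subst e1; decide
  by_cases e2 : r = 2
  · subst e2; decide
  by_cases e3 : r = 3
  · subst e3; decide
  by_cases e4 : r = 4
  · subst e4; decide
  have h5 : 5 ≤ r := by omega
  rcases Int.even_or_odd r with ⟨c, hc⟩ | ⟨c, hc⟩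
  · rw [show r = 2 * c from by omega]
    exact mainEven c (by omega)
  · rw [show r = 2 * c + 1 from by omega]
    exact mainOdd c (by omega)

-- ===== VERDICT (by name: the statement is the Claim_ definition above) =====
theorem generate_corbata_row_spec : Claim_equal_generate_corbata_row := by
  intro r _ hpre
  exact finalSpec r hpre
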